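-- pv_equiv track=rewrite | github.com/isa-nurbek/leet-code-challenges | Recursion/03-Hard/05-Ambiguous Measurements/solution_2.py | ambiguous_measurements
-- ===== SOURCE A (Python) =====
-- from collections import deque
--
-- def ambiguous_measurements(measuring_cups, low, high):
--     """
--     Determines if we can measure a quantity between `low` and `high` using the given measuring cups.
--
--     Each measuring cup provides a range [cup_low, cup_high]. The goal is to see if by combining
--     these cups (summing their ranges), we can achieve a range that falls within [low, high].
--
--     Args:
--         measuring_cups: List of tuples, where each tuple represents a cup's measurement range (low, high).
--         low: The target lower bound.
--         high: The target upper bound.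
--
--     Returns:
--         bool: True if a valid combination exists, False otherwise.
--     """
--
--     # We use a queue to perform a BFS (Breadth-First Search) over possible sums of ranges.
--     # Each element in the queue is a tuple (current_sum_low, current_sum_high).
--     queue = deque()
--     queue.append((0, 0))  # Start with zero measurements
--
--     # A set to keep track of visited states to avoid redundant processing.
--     visited = set()
--     visited.add((0, 0))  # Mark the initial state as visited
--
--     while queue:
--         current_low_sum, current_high_sum = queue.popleft()
--
--         # Check if the current summed range falls within the target [low, high]
--         if current_low_sum >= low and current_high_sum <= high:
--             return True  # Found a valid combination
--
--         # Explore all possible next steps by adding each measuring cup's range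
--         for cup in measuring_cups:
--             cup_low, cup_high = cup
--
--             # Calculate new summed range after using the current cup
--             new_low_sum = current_low_sum + cup_low
--             new_high_sum = current_high_sum + cup_high
--
--             # If the new high exceeds the target high, skip this path (pruning)
--             if new_high_sum > high:
--                 continue
--
--             # Check if this new state has been visited before
--             if (new_low_sum, new_high_sum) not in visited:
--                 visited.add((new_low_sum, new_high_sum))  # Mark as visited
--                 queue.append(
--                     (new_low_sum, new_high_sum)
--                 )  # Add to queue for further exploration
--
--     # If queue is exhausted and no valid combination found, return False
--     return False
-- ===== SOURCE B (Python) =====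
-- def _insort(xs, x):
--     # insert x into the sorted list xs, keeping it sorted
--     for i, y in enumerate(xs):
--         if x < y:
--             xs.insert(i, x)
--             return
--     xs.append(x)
--
-- def ambiguous_measurements(measuring_cups, low, high):
--     # Sparse unbounded-knapsack DP: best[h] = the maximal achievable low-sum over
--     # all multisets of cups whose high-sum is exactly h; only reachable high-sums
--     # are stored, and they are processed in increasing order, so each entry is
--     # final when it is processed.  Answer: some processed h has best[h] >= low.
--     if high < 0:
--         return False
--     if low <= 0:
--         return True  # the empty combination measures 0, and low <= 0 <= high
--     best = {0: 0}
--     pending = [0]  # unprocessed reachable high-sums, kept sorted ascending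
--     while pending:
--         h = pending.pop(0)
--         b = best[h]
--         if b >= low:
--             return True
--         for cup_low, cup_high in measuring_cups:
--             nh = h + cup_high
--             if h < nh <= high:
--                 cand = b + cup_low
--                 if nh not in best:
--                     best[nh] = cand
--                     _insort(pending, nh)
--                 elif best[nh] < cand:
--                     best[nh] = cand
--     return False
-- ===== Notes on version B (the rewrite author's own statement) =====
-- stated objective: alternative
-- what changed: Replaces A's BFS over (low_sum, high_sum) states with a visited set by a sparse unbounded-knapsack DP: a dict keyed by reachable high-sums holding only the maximal achievable low-sum, processed in increasing key order (one entry per high-sum instead of one state per (low,high) pair).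
-- outside the precondition, e.g. on ambiguous_measurements([(0, 0)], 1, 5): A returns False, B returns False; on ambiguous_measurements([(5, 0)], 5, 0): A returns True, B returns False
import Mathlib
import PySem

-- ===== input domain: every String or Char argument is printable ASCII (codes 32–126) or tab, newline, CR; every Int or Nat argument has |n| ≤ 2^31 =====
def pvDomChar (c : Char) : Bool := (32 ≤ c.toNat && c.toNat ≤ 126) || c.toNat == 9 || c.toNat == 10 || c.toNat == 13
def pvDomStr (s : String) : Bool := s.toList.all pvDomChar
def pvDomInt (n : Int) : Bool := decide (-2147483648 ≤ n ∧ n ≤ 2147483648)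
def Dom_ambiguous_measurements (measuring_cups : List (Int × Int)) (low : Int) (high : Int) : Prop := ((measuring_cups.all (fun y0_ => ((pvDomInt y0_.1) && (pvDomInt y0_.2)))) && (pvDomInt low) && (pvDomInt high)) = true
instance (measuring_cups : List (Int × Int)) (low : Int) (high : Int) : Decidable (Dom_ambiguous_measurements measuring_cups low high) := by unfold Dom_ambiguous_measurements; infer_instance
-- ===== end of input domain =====

-- B replaces A's BFS over (low_sum, high_sum) states by a bottom-up unbounded-knapsack DP
-- keyed by reachable high-sums, keeping only the maximal low-sum per high-sum (objective: alternative).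

-- ===== PORT A =====
-- Fuel bound for the while-loop: Python's BFS terminates on Pre_ because each state is
-- visited once and (on Pre_) there are at most (2*M*H+1)*(H+1) states; fuel 2*states+1
-- strictly dominates the number of loop iterations.
def pvM (cups : List (Int × Int)) : Int := cups.foldl (fun m c => max m |c.1|) 0
def pvH (high : Int) : Int := max high 0
def pvFuelA (cups : List (Int × Int)) (high : Int) : Nat :=
  2 * ((2 * pvM cups * pvH high + 1) * (pvH high + 1)).toNat + 1

-- the body of A's `for cup in measuring_cups` loop (state: queue, visited)
def bfsStep (high : Int) (s : Int × Int)
    (qv : List (Int × Int) × List (Int × Int)) (cup : Int × Int) :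
    List (Int × Int) × List (Int × Int) :=
  let nl := s.1 + cup.1
  let nh := s.2 + cup.2
  if high < nh then qv
  else if (nl, nh) ∈ qv.2 then qv
  else (qv.1 ++ [(nl, nh)], (nl, nh) :: qv.2)

def bfsFold (cups : List (Int × Int)) (high : Int) (s : Int × Int)
    (qv : List (Int × Int) × List (Int × Int)) : List (Int × Int) × List (Int × Int) :=
  cups.foldl (bfsStep high s) qv

-- A's `while queue` loop; visited kept as the list of distinct states seen
def bfsAux (cups : List (Int × Int)) (low high : Int) :
    Nat → List (Int × Int) → List (Int × Int) → Bool
  | 0, _, _ => false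
  | _ + 1, [], _ => false
  | fuel + 1, s :: q, v =>
    if low ≤ s.1 ∧ s.2 ≤ high then true
    else
      let qv := bfsFold cups high s (q, v)
      bfsAux cups low high fuel qv.1 qv.2

def ambiguous_measurements (measuring_cups : List (Int × Int)) (low : Int) (high : Int) : Bool :=
  bfsAux measuring_cups low high (pvFuelA measuring_cups high) [(0, 0)] [(0, 0)]

-- ===== PORT B =====
-- B helper `_insort`: insert x into a sorted list, keeping it sorted
def insort : List Int → Int → List Int
  | [], x => [x]
  | y :: ys, x => if x < y then x :: y :: ys else y :: insort ys x

-- the body of B's `for cup_low, cup_high in measuring_cups` loop (state: pending, best)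
def spStep (high : Int) (h b : Int)
    (pb : List Int × PySem.Dict Int Int) (cup : Int × Int) :
    List Int × PySem.Dict Int Int :=
  let nh := h + cup.2
  if h < nh ∧ nh ≤ high then
    let cand := b + cup.1
    match pb.2.get? nh with
    | none => (insort pb.1 nh, pb.2.insert nh cand)
    | some old => if old < cand then (pb.1, pb.2.insert nh cand) else pb
  else pb

-- B's `while pending` loop; the fuel bounds the iteration count (each iteration
-- freezes one more of the at most high+1 distinct reachable keys)
def spGo (cups : List (Int × Int)) (low high : Int) :
    Nat → List Int → PySem.Dict Int Int → Bool
  | 0, _, _ => false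
  | _ + 1, [], _ => false
  | fuel + 1, h :: pending, best =>
    let b := best.getD h 0   -- Python's best[h]; the key is always present when popped
    if low ≤ b then true
    else
      let pb := cups.foldl (spStep high h b) (pending, best)
      spGo cups low high fuel pb.1 pb.2

def ambiguous_measurements_alt (measuring_cups : List (Int × Int)) (low : Int) (high : Int) : Bool :=
  if high < 0 then false
  else if low ≤ 0 then true  -- the empty combination measures 0, and low ≤ 0 ≤ high
  else spGo measuring_cups low high ((high + 1).toNat + 1) [0]
    (PySem.Dict.empty.insert 0 0)

-- ===== PRECONDITION & SPEC =====
-- Pre_ covers the inputs on which A terminates for a structural reason: the trivially-true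
-- case low ≤ 0 ≤ high (answered at the first BFS pop), every cup's upper bound at least 1
-- (finite state space), or high < 0 with every cup's upper bound above high (every move is
-- pruned at once).  Outside Pre_ a cup with non-positive upper bound makes the state space
-- infinite and A's BFS loops forever on most such inputs (it does return on a few of
-- them — see the cites in claim.json).
def Pre_ambiguous_measurements (measuring_cups : List (Int × Int)) (low : Int) (high : Int) : Prop :=
  (low ≤ 0 ∧ 0 ≤ high) ∨ (∀ c ∈ measuring_cups, 1 ≤ c.2) ∨
    (high < 0 ∧ ∀ c ∈ measuring_cups, high < c.2)
instance (measuring_cups : List (Int × Int)) (low : Int) (high : Int) : Decidable (Pre_ambiguous_measurements measuring_cups low high) := by unfold Pre_ambiguous_measurements; infer_instance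

def pvWitness_ambiguous_measurements : (List (Int × Int)) × Int × Int := ([(2, 3), (1, 2)], 4, 7)

def Spec_ambiguous_measurements (measuring_cups : List (Int × Int)) (low : Int) (high : Int) (out : Bool) : Prop := out = ambiguous_measurements_alt measuring_cups low high
instance (measuring_cups : List (Int × Int)) (low : Int) (high : Int) (out : Bool) : Decidable (Spec_ambiguous_measurements measuring_cups low high out) := by unfold Spec_ambiguous_measurements; infer_instance

-- ===== CLAIM (what is proved, stated in full; the proofs are below) =====
def Claim_equal_ambiguous_measurements : Prop := ∀ (measuring_cups : List (Int × Int)) (low : Int) (high : Int), Dom_ambiguous_measurements measuring_cups low high → Pre_ambiguous_measurements measuring_cups low high → Spec_ambiguous_measurements measuring_cups low high (ambiguous_measurements measuring_cups low high)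

-- ===== LEMMAS AND PROOFS =====

-- sums of a chosen multiset of cups
def sumLo (ms : List (Int × Int)) : Int := (ms.map Prod.fst).sum
def sumHi (ms : List (Int × Int)) : Int := (ms.map Prod.snd).sum

-- all chosen cups come from the input list
def Mems (cups ms : List (Int × Int)) : Prop := ∀ c ∈ ms, c ∈ cups

-- the common specification both programs decide (on Pre_'s second disjunct)
def SpecP (cups : List (Int × Int)) (low high : Int) : Prop :=
  ∃ ms, Mems cups ms ∧ low ≤ sumLo ms ∧ sumHi ms ≤ high

-- state t is a realizable pair of sums
def ReachP (cups : List (Int × Int)) (t : Int × Int) : Prop :=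
  ∃ ms, Mems cups ms ∧ sumLo ms = t.1 ∧ sumHi ms = t.2

def Pre2 (cups : List (Int × Int)) : Prop := ∀ c ∈ cups, 1 ≤ c.2

@[simp] lemma sumLo_nil : sumLo [] = 0 := rfl
@[simp] lemma sumHi_nil : sumHi [] = 0 := rfl
@[simp] lemma sumLo_cons (c : Int × Int) (ms : List (Int × Int)) :
    sumLo (c :: ms) = c.1 + sumLo ms := by simp [sumLo]
@[simp] lemma sumHi_cons (c : Int × Int) (ms : List (Int × Int)) :
    sumHi (c :: ms) = c.2 + sumHi ms := by simp [sumHi]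

lemma sumHi_nonneg {cups ms : List (Int × Int)} (hpre : Pre2 cups) (hm : Mems cups ms) :
    0 ≤ sumHi ms := by
  induction ms with
  | nil => simp
  | cons c ms ih =>
    have h1 : 1 ≤ c.2 := hpre c (hm c (by simp))
    have h2 : 0 ≤ sumHi ms := ih (fun d hd => hm d (by simp [hd]))
    simp; omega

lemma pvM_ge_init : ∀ (l : List (Int × Int)) (a : Int),
    a ≤ l.foldl (fun m c => max m |c.1|) a := by
  intro l
  induction l with
  | nil => intro a; simp
  | cons c l ih =>
    intro a
    calc a ≤ max a |c.1| := le_max_left _ _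
    _ ≤ _ := ih _

lemma pvM_ge_mem : ∀ (l : List (Int × Int)) (a : Int) (c : Int × Int), c ∈ l →
    |c.1| ≤ l.foldl (fun m c => max m |c.1|) a := by
  intro l
  induction l with
  | nil => intro a c hc; simp at hc
  | cons d l ih =>
    intro a c hc
    rcases List.mem_cons.mp hc with h | h
    · subst h
      calc |c.1| ≤ max a |c.1| := le_max_right _ _
      _ ≤ _ := pvM_ge_init _ _
    · exact ih _ _ h

lemma pvM_nonneg (cups : List (Int × Int)) : 0 ≤ pvM cups := pvM_ge_init cups 0
lemma pvM_spec {cups : List (Int × Int)} {c : Int × Int} (hc : c ∈ cups) : |c.1| ≤ pvM cups :=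
  pvM_ge_mem cups 0 c hc
lemma pvH_nonneg (high : Int) : 0 ≤ pvH high := le_max_right _ _

-- number of states all visited states live in (on Pre_)
def NSS (cups : List (Int × Int)) (high : Int) : Nat :=
  ((2 * pvM cups * pvH high + 1) * (pvH high + 1)).toNat

def InSS (cups : List (Int × Int)) (high : Int) (t : Int × Int) : Prop :=
  |t.1| ≤ pvM cups * t.2 ∧ 0 ≤ t.2 ∧ t.2 ≤ pvH high

lemma nodup_length_le_NSS {cups : List (Int × Int)} {high : Int} {l : List (Int × Int)}
    (hn : l.Nodup) (hsub : ∀ t ∈ l, InSS cups high t) : l.length ≤ NSS cups high := by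
  classical
  have hM := pvM_nonneg cups
  have hH := pvH_nonneg high
  have hMH : 0 ≤ pvM cups * pvH high := mul_nonneg hM hH
  set s : Finset (Int × Int) :=
    Finset.Icc (-(pvM cups * pvH high)) (pvM cups * pvH high) ×ˢ Finset.Icc 0 (pvH high) with hs
  have hmem : ∀ t ∈ l, t ∈ s := by
    intro t ht
    obtain ⟨h1, h2, h3⟩ := hsub t ht
    have h4 : pvM cups * t.2 ≤ pvM cups * pvH high := mul_le_mul_of_nonneg_left h3 hM
    have habs : |t.1| ≤ pvM cups * pvH high := le_trans h1 h4
    rw [abs_le] at habs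
    simp only [hs, Finset.mem_product, Finset.mem_Icc]
    omega
  have hsubf : l.toFinset ⊆ s := fun x hx => hmem x (List.mem_toFinset.mp hx)
  have hcard : s.card = NSS cups high := by
    rw [hs, Finset.card_product, Int.card_Icc, Int.card_Icc, NSS]
    have e1 : pvM cups * pvH high + 1 - -(pvM cups * pvH high) = 2 * pvM cups * pvH high + 1 := by
      ring
    rw [e1, Int.toNat_mul (by omega) (by omega)]
    congr 1
    omega
  calc l.length = l.toFinset.card := (List.toFinset_card_of_nodup hn).symm
  _ ≤ s.card := Finset.card_le_card hsubf
  _ = NSS cups high := hcard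

-- invariant of the inner for-loop fold (p : current (queue, visited))
def FInv (cups : List (Int × Int)) (low high : Int) (s : Int × Int)
    (q' v : List (Int × Int)) (p : List (Int × Int) × List (Int × Int)) : Prop :=
  p.2.Nodup ∧ p.1.Nodup ∧ (∀ t ∈ p.1, t ∈ p.2) ∧
  (∀ t ∈ p.2, ReachP cups t ∧ InSS cups high t) ∧
  (∀ t ∈ p.2, t ∉ p.1 → t ∈ v ∧ (t = s ∨ t ∉ s :: q')) ∧
  (∀ t ∈ v, t ∈ p.2) ∧ s ∈ p.2 ∧ s ∉ p.1 ∧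
  p.2.length + q'.length = v.length + p.1.length ∧
  v.length ≤ p.2.length

lemma bfsStep_inv {cups : List (Int × Int)} {low high : Int} {s : Int × Int}
    {q' v : List (Int × Int)} (hpre : Pre2 cups) {c : Int × Int} (hc : c ∈ cups)
    {p : List (Int × Int) × List (Int × Int)} (hp : FInv cups low high s q' v p) :
    FInv cups low high s q' v (bfsStep high s p c) ∧
    (∀ t ∈ p.2, t ∈ (bfsStep high s p c).2) ∧
    (s.2 + c.2 ≤ high → (s.1 + c.1, s.2 + c.2) ∈ (bfsStep high s p c).2) := by
  obtain ⟨hv, hq, hqv, hri, hcl5, hvv, hs2, hs1, hlen, hmono⟩ := hp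
  unfold bfsStep
  simp only []
  split_ifs with h1 h2
  · exact ⟨⟨hv, hq, hqv, hri, hcl5, hvv, hs2, hs1, hlen, hmono⟩, fun t ht => ht,
      fun hg => absurd hg (by omega)⟩
  · exact ⟨⟨hv, hq, hqv, hri, hcl5, hvv, hs2, hs1, hlen, hmono⟩, fun t ht => ht, fun _ => h2⟩
  · -- new state n is enqueued and marked visited
    set n : Int × Int := (s.1 + c.1, s.2 + c.2) with hn
    have hc2 : 1 ≤ c.2 := hpre c hc
    have hMc : |c.1| ≤ pvM cups := pvM_spec hc
    have hMn : 0 ≤ pvM cups := pvM_nonneg cups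
    have hnp1 : n ∉ p.1 := fun h => h2 (hqv n h)
    have hreach : ReachP cups n := by
      obtain ⟨ms, hm, hlo, hhi⟩ := (hri s hs2).1
      exact ⟨c :: ms, fun d hd => by
          rcases List.mem_cons.mp hd with h | h
          · exact h ▸ hc
          · exact hm d h,
        by simp [hlo, hn]; omega, by simp [hhi, hn]; omega⟩
    have hinss : InSS cups high n := by
      obtain ⟨i1, i2, i3⟩ := (hri s hs2).2
      refine ⟨?_, by simp [hn]; omega, ?_⟩
      · have habs : |s.1 + c.1| ≤ |s.1| + |c.1| := abs_add_le _ _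
        have e1 : |s.1| + |c.1| ≤ pvM cups * s.2 + pvM cups := by omega
        have e2 : pvM cups * (s.2 + 1) ≤ pvM cups * (s.2 + c.2) :=
          mul_le_mul_of_nonneg_left (by omega) hMn
        have e3 : pvM cups * (s.2 + 1) = pvM cups * s.2 + pvM cups := by ring
        simp only [hn]
        omega
      · have : s.2 + c.2 ≤ high := by omega
        simp only [hn]
        calc s.2 + c.2 ≤ high := this
        _ ≤ pvH high := le_max_left _ _
    refine ⟨⟨List.nodup_cons.mpr ⟨h2, hv⟩, ?_, ?_, ?_, ?_, ?_, ?_, ?_, ?_, ?_⟩, ?_, ?_⟩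
    · rw [List.nodup_append]
      refine ⟨hq, List.nodup_singleton n, ?_⟩
      intro a ha b hb
      rw [List.mem_singleton] at hb
      subst hb
      exact fun he => hnp1 (he ▸ ha)
    · intro t ht
      rcases List.mem_append.mp ht with h | h
      · exact List.mem_cons_of_mem _ (hqv t h)
      · simp at h; simp [h]
    · intro t ht
      rcases List.mem_cons.mp ht with h | h
      · exact h ▸ ⟨hreach, hinss⟩
      · exact hri t h
    · intro t ht hnt
      rcases List.mem_cons.mp ht with h | h
      · exact absurd (h ▸ (List.mem_append.mpr (Or.inr (by simp)))) hnt
      · exact hcl5 t h (fun hq1 => hnt (List.mem_append.mpr (Or.inl hq1)))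
    · exact fun t ht => List.mem_cons_of_mem _ (hvv t ht)
    · exact List.mem_cons_of_mem _ hs2
    · intro h
      rcases List.mem_append.mp h with h | h
      · exact hs1 h
      · simp at h; exact h2 (h ▸ hs2)
    · simp only [List.length_cons, List.length_append, List.length_nil]
      omega
    · simp only [List.length_cons]; omega
    · exact fun t ht => List.mem_cons_of_mem _ ht
    · intro _; simp

lemma bfsFold_inv {cups : List (Int × Int)} {low high : Int} {s : Int × Int}
    {q' v : List (Int × Int)} (hpre : Pre2 cups) :
    ∀ (cs : List (Int × Int)), (∀ c ∈ cs, c ∈ cups) →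
    ∀ p, FInv cups low high s q' v p →
    FInv cups low high s q' v (cs.foldl (bfsStep high s) p) ∧
    (∀ t ∈ p.2, t ∈ (cs.foldl (bfsStep high s) p).2) ∧
    (∀ c ∈ cs, s.2 + c.2 ≤ high → (s.1 + c.1, s.2 + c.2) ∈ (cs.foldl (bfsStep high s) p).2) := by
  intro cs
  induction cs with
  | nil => exact fun _ p hp => ⟨hp, fun t ht => ht, by simp⟩
  | cons c cs ih =>
    intro hcs p hp
    have hc : c ∈ cups := hcs c (by simp)
    obtain ⟨hp', hmono', hclo'⟩ := bfsStep_inv (low := low) (q' := q') (v := v) hpre hc hp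
    obtain ⟨hF, hmono, hclo⟩ := ih (fun d hd => hcs d (by simp [hd])) (bfsStep high s p c) hp'
    rw [List.foldl_cons]
    refine ⟨hF, fun t ht => hmono t (hmono' t ht), ?_⟩
    intro d hd hg
    rcases List.mem_cons.mp hd with h | h
    · exact h ▸ hmono _ (hclo' (h ▸ hg))
    · exact hclo d h hg

-- the whole-BFS invariant
def BInv (cups : List (Int × Int)) (low high : Int) (q v : List (Int × Int)) : Prop :=
  v.Nodup ∧ q.Nodup ∧ (∀ t ∈ q, t ∈ v) ∧
  (∀ t ∈ v, ReachP cups t ∧ InSS cups high t) ∧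
  (∀ t ∈ v, t ∉ q → ¬(low ≤ t.1 ∧ t.2 ≤ high) ∧
    ∀ c ∈ cups, t.2 + c.2 ≤ high → (t.1 + c.1, t.2 + c.2) ∈ v)

lemma bfs_step_BInv {cups : List (Int × Int)} {low high : Int} {s : Int × Int}
    {q' v : List (Int × Int)} (hpre : Pre2 cups)
    (hinv : BInv cups low high (s :: q') v) (hng : ¬(low ≤ s.1 ∧ s.2 ≤ high)) :
    BInv cups low high (bfsFold cups high s (q', v)).1 (bfsFold cups high s (q', v)).2 ∧
    (∀ t ∈ v, t ∈ (bfsFold cups high s (q', v)).2) ∧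
    (bfsFold cups high s (q', v)).2.length + q'.length
      = v.length + (bfsFold cups high s (q', v)).1.length ∧
    v.length ≤ (bfsFold cups high s (q', v)).2.length := by
  obtain ⟨hv, hq, hqv, hri, hcl⟩ := hinv
  have hsv : s ∈ v := hqv s (by simp)
  have hsq' : s ∉ q' := (List.nodup_cons.mp hq).1
  have hq'n : q'.Nodup := (List.nodup_cons.mp hq).2
  have hinit : FInv cups low high s q' v (q', v) := by
    refine ⟨hv, hq'n, fun t ht => hqv t (by simp [ht]), hri, ?_, fun t ht => ht, hsv, hsq', rfl,
      le_refl _⟩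
    intro t ht hnt
    by_cases hts : t = s
    · exact ⟨ht, Or.inl hts⟩
    · exact ⟨ht, Or.inr (by simp [hts, hnt])⟩
  obtain ⟨hF, hmono, hclo⟩ := bfsFold_inv (low := low) hpre cups (fun c hc => hc) (q', v) hinit
  obtain ⟨hv', hq'2, hqv', hri', hcl5', hvv', _, _, hlen', hmono'⟩ := hF
  refine ⟨⟨hv', hq'2, hqv', hri', ?_⟩, hvv', hlen', hmono'⟩
  intro t ht hnt
  obtain ⟨htv, hcase⟩ := hcl5' t ht hnt
  rcases hcase with hts | hto
  · subst hts
    exact ⟨hng, fun c hc hg => hclo c hc hg⟩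
  · have hold := hcl t htv hto
    exact ⟨hold.1, fun c hc hg => hvv' _ (hold.2 c hc hg)⟩

lemma closed_not_goodfrom {cups : List (Int × Int)} {low high : Int} {v : List (Int × Int)}
    (hpre : Pre2 cups)
    (hcl : ∀ t ∈ v, ¬(low ≤ t.1 ∧ t.2 ≤ high) ∧
      ∀ c ∈ cups, t.2 + c.2 ≤ high → (t.1 + c.1, t.2 + c.2) ∈ v) :
    ∀ ms, Mems cups ms → ∀ t ∈ v, ¬(low ≤ t.1 + sumLo ms ∧ t.2 + sumHi ms ≤ high) := by
  intro ms
  induction ms with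
  | nil =>
    intro _ t ht hcon
    simp only [sumLo_nil, sumHi_nil, add_zero] at hcon
    exact (hcl t ht).1 hcon
  | cons c ms ih =>
    intro hm t ht hcon
    obtain ⟨hg1, hg2⟩ := hcon
    rw [sumLo_cons] at hg1
    rw [sumHi_cons] at hg2
    have hmt : Mems cups ms := fun d hd => hm d (by simp [hd])
    have hcc : c ∈ cups := hm c (by simp)
    have hnn : 0 ≤ sumHi ms := sumHi_nonneg hpre hmt
    have hstep : t.2 + c.2 ≤ high := by omega
    have hsucc := (hcl t ht).2 c hcc hstep
    exact ih hmt _ hsucc ⟨by simp; omega, by simp; omega⟩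

def muBFS (cups : List (Int × Int)) (high : Int) (q v : List (Int × Int)) : Nat :=
  2 * (NSS cups high - v.length) + q.length

lemma bfs_false {cups : List (Int × Int)} {low high : Int} :
    ∀ (fuel : Nat) (q v : List (Int × Int)), Pre2 cups →
    BInv cups low high q v → muBFS cups high q v ≤ fuel →
    bfsAux cups low high fuel q v = false →
    ∀ t ∈ v, ∀ ms, Mems cups ms → ¬(low ≤ t.1 + sumLo ms ∧ t.2 + sumHi ms ≤ high) := by
  intro fuel
  induction fuel with
  | zero =>
    intro q v hpre hinv hmu _
    have hql : q = [] := by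
      unfold muBFS at hmu
      cases q with
      | nil => rfl
      | cons a q => simp [List.length_cons] at hmu
    subst hql
    intro t ht ms hm
    exact closed_not_goodfrom hpre (fun t ht => hinv.2.2.2.2 t ht (by simp)) ms hm t ht
  | succ fuel ih =>
    intro q v hpre hinv hmu hres
    cases q with
    | nil =>
      intro t ht ms hm
      exact closed_not_goodfrom hpre (fun t ht => hinv.2.2.2.2 t ht (by simp)) ms hm t ht
    | cons s q' =>
      rw [bfsAux] at hres
      by_cases hg : low ≤ s.1 ∧ s.2 ≤ high
      · simp [hg] at hres
      · rw [if_neg hg] at hres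
        obtain ⟨hinv', hvsub, hlen, hlenmono⟩ := bfs_step_BInv hpre hinv hg
        have hle : (bfsFold cups high s (q', v)).2.length ≤ NSS cups high :=
          nodup_length_le_NSS hinv'.1 (fun t ht => (hinv'.2.2.2.1 t ht).2)
        have hmu' : muBFS cups high (bfsFold cups high s (q', v)).1
            (bfsFold cups high s (q', v)).2 ≤ fuel := by
          unfold muBFS at hmu ⊢
          simp only [List.length_cons] at hmu
          omega
        have hall := ih _ _ hpre hinv' hmu' hres
        intro t ht
        exact hall t (hvsub t ht)

lemma bfs_true {cups : List (Int × Int)} {low high : Int} :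
    ∀ (fuel : Nat) (q v : List (Int × Int)), Pre2 cups →
    BInv cups low high q v → bfsAux cups low high fuel q v = true →
    SpecP cups low high := by
  intro fuel
  induction fuel with
  | zero => intro q v _ _ h; simp [bfsAux] at h
  | succ fuel ih =>
    intro q v hpre hinv hres
    cases q with
    | nil => simp [bfsAux] at hres
    | cons s q' =>
      rw [bfsAux] at hres
      by_cases hg : low ≤ s.1 ∧ s.2 ≤ high
      · obtain ⟨ms, hm, hlo, hhi⟩ := (hinv.2.2.2.1 s (hinv.2.2.1 s (by simp))).1
        exact ⟨ms, hm, by omega, by omega⟩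
      · rw [if_neg hg] at hres
        obtain ⟨hinv', _, _, _⟩ := bfs_step_BInv hpre hinv hg
        exact ih _ _ hpre hinv' hres

lemma BInv_init {cups : List (Int × Int)} {low high : Int} :
    BInv cups low high [((0 : Int), (0 : Int))] [((0 : Int), (0 : Int))] := by
  refine ⟨by simp, by simp, fun t ht => ht, ?_, ?_⟩
  · intro t ht
    simp at ht
    subst ht
    exact ⟨⟨[], fun c hc => absurd hc (List.not_mem_nil), by simp, by simp⟩,
      by simp [InSS, pvH_nonneg]⟩
  · intro t ht hnt
    simp at ht
    exact absurd (by simp [ht]) hnt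

lemma A_iff {cups : List (Int × Int)} {low high : Int} (hpre : Pre2 cups) :
    ambiguous_measurements cups low high = true ↔ SpecP cups low high := by
  constructor
  · intro h
    exact bfs_true (pvFuelA cups high) _ _ hpre BInv_init h
  · intro hspec
    by_contra hres
    have hres' : ambiguous_measurements cups low high = false := by
      revert hres
      cases ambiguous_measurements cups low high <;> simp
    obtain ⟨ms, hm, h1, h2⟩ := hspec
    have hmu0 : muBFS cups high [((0:Int),(0:Int))] [((0:Int),(0:Int))] ≤ pvFuelA cups high := by
      have : pvFuelA cups high = 2 * NSS cups high + 1 := rfl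
      unfold muBFS
      simp only [List.length_singleton]
      omega
    have hall := bfs_false (pvFuelA cups high) _ _ hpre BInv_init hmu0 hres'
      ((0 : Int), (0 : Int)) (by simp) ms hm
    exact hall ⟨by simpa using h1, by simpa using h2⟩

-- ===== B-side =====

def ReachAt (cups : List (Int × Int)) (k v : Int) : Prop :=
  ∃ ms, Mems cups ms ∧ sumHi ms = k ∧ sumLo ms = v

-- every usable move from an entry is dominated by another entry
def Closure (cups : List (Int × Int)) (high : Int) (best : PySem.Dict Int Int)
    (k v : Int) : Prop :=
  ∀ c ∈ cups, k + c.2 ≤ high → ∃ v', best.get? (k + c.2) = some v' ∧ v + c.1 ≤ v'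

lemma mem_insort : ∀ (l : List Int) (x y : Int), y ∈ insort l x ↔ y = x ∨ y ∈ l := by
  intro l
  induction l with
  | nil => intro x y; simp [insort]
  | cons z zs ih =>
    intro x y
    unfold insort
    split_ifs with hx
    · simp [or_comm, or_left_comm]
    · simp [ih, or_comm, or_left_comm]

lemma insort_length : ∀ (l : List Int) (x : Int), (insort l x).length = l.length + 1 := by
  intro l
  induction l with
  | nil => intro x; rfl
  | cons z zs ih =>
    intro x
    unfold insort
    split_ifs with hx
    · simp
    · simp [ih]

lemma insort_pairwise : ∀ (l : List Int), l.Pairwise (· < ·) → ∀ x, x ∉ l →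
    (insort l x).Pairwise (· < ·) := by
  intro l
  induction l with
  | nil => intro _ x _; simp [insort]
  | cons y ys ih =>
    intro hp x hx
    obtain ⟨hy, hys⟩ := List.pairwise_cons.mp hp
    unfold insort
    split_ifs with hlt
    · refine List.pairwise_cons.mpr ⟨?_, hp⟩
      intro z hz
      rcases List.mem_cons.mp hz with hz | hz
      · omega
      · have := hy z hz
        omega
    · have hxy : y < x := by
        have : x ≠ y := fun he => hx (by simp [he])
        omega
      refine List.pairwise_cons.mpr ⟨?_, ih hys x (fun hm => hx (by simp [hm]))⟩
      intro z hz
      rcases (mem_insort ys x z).mp hz with hz | hz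
      · omega
      · exact hy z hz

-- invariant of the inner for-loop fold (pb : current (pending, best));
-- frame: the popped key h with its value b, the remaining pending list P, the dict best
def FInvS (cups : List (Int × Int)) (low high : Int) (h b : Int) (P : List Int)
    (best : PySem.Dict Int Int) (pb : List Int × PySem.Dict Int Int) : Prop :=
  pb.1.Pairwise (· < ·) ∧
  (∀ p ∈ pb.1, p ∈ pb.2.keys) ∧
  pb.2.keys.Nodup ∧
  (∀ k v, pb.2.get? k = some v → 0 ≤ k ∧ k ≤ high ∧ ReachAt cups k v) ∧
  (∀ k v, best.get? k = some v → ∃ v', pb.2.get? k = some v' ∧ v ≤ v') ∧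
  (∀ k v, pb.2.get? k = some v → k ∉ pb.1 →
    (k = h ∧ v = b) ∨ (best.get? k = some v ∧ k ∉ P ∧ k ≠ h ∧ k < h)) ∧
  (∀ p ∈ pb.1, p ∈ P ∨ h < p) ∧
  h ∉ pb.1 ∧
  pb.2.keys.length + P.length = best.keys.length + pb.1.length

lemma spStep_mono (high : Int) (h b : Int) (pb : List Int × PySem.Dict Int Int)
    (cup : Int × Int) (k v : Int) (hv : pb.2.get? k = some v) :
    ∃ v', (spStep high h b pb cup).2.get? k = some v' ∧ v ≤ v' := by
  simp only [spStep]
  split_ifs with hg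
  · cases hD : pb.2.get? (h + cup.2) with
    | none =>
      simp only [hD]
      have hk : k ≠ h + cup.2 := fun he => by rw [he, hD] at hv; exact absurd hv (by simp)
      rw [PySem.Dict.get?_insert, if_neg hk]
      exact ⟨v, hv, le_refl _⟩
    | some old =>
      simp only [hD]
      split_ifs with ho
      · by_cases hk : k = h + cup.2
        · subst hk
          rw [PySem.Dict.get?_insert, if_pos rfl]
          rw [hD] at hv
          obtain rfl : old = v := by injection hv
          exact ⟨b + cup.1, rfl, by omega⟩
        · rw [PySem.Dict.get?_insert, if_neg hk]
          exact ⟨v, hv, le_refl _⟩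
      · exact ⟨v, hv, le_refl _⟩
  · exact ⟨v, hv, le_refl _⟩

lemma spFoldL_mono (high : Int) (h b : Int) :
    ∀ (cs : List (Int × Int)) (pb : List Int × PySem.Dict Int Int) (k v : Int),
    pb.2.get? k = some v →
    ∃ v', (cs.foldl (spStep high h b) pb).2.get? k = some v' ∧ v ≤ v' := by
  intro cs
  induction cs with
  | nil => intro pb k v hv; exact ⟨v, hv, le_refl _⟩
  | cons c cs ih =>
    intro pb k v hv
    obtain ⟨v1, hv1, hle1⟩ := spStep_mono high h b pb c k v hv
    obtain ⟨v2, hv2, hle2⟩ := ih _ _ _ hv1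
    exact ⟨v2, by rw [List.foldl_cons]; exact hv2, by omega⟩

lemma spStep_inv {cups : List (Int × Int)} {low high : Int} {h b : Int} {P : List Int}
    {best : PySem.Dict Int Int} {c : Int × Int} (hc : c ∈ cups)
    (h0 : 0 ≤ h) (hbr : ReachAt cups h b)
    {pb : List Int × PySem.Dict Int Int} (hp : FInvS cups low high h b P best pb) :
    FInvS cups low high h b P best (spStep high h b pb c) ∧
    (1 ≤ c.2 → h + c.2 ≤ high →
      ∃ v', (spStep high h b pb c).2.get? (h + c.2) = some v' ∧ b + c.1 ≤ v') := by
  obtain ⟨f1, f2, f3, f4, f5, f6, f7, f8, f9⟩ := hp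
  have hreach_nh : h < h + c.2 → ReachAt cups (h + c.2) (b + c.1) := by
    intro _
    obtain ⟨ms, hm, hhi, hlo⟩ := hbr
    refine ⟨c :: ms, ?_, by rw [sumHi_cons]; omega, by rw [sumLo_cons]; omega⟩
    intro d hd
    rcases List.mem_cons.mp hd with hd | hd
    · exact hd ▸ hc
    · exact hm d hd
  simp only [spStep]
  split_ifs with hg
  · obtain ⟨hg1, hg2⟩ := hg
    cases hD : pb.2.get? (h + c.2) with
    | none =>
      -- fresh key: append to the dict, insert into pending
      have hnh_keys : h + c.2 ∉ pb.2.keys :=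
        (PySem.Dict.get?_eq_none_iff_not_mem_keys _ _).mp hD
      have hnh_pb1 : h + c.2 ∉ pb.1 := fun hm => hnh_keys (f2 _ hm)
      have hcontains : pb.2.contains (h + c.2) = false :=
        (PySem.Dict.get?_eq_none_iff_contains _ _).mp hD
      simp only [hD]
      refine ⟨⟨insort_pairwise pb.1 f1 _ hnh_pb1, ?_, PySem.Dict.nodup_keys_insert _ _ _ f3,
        ?_, ?_, ?_, ?_, ?_, ?_⟩, ?_⟩
      · intro p hp
        rw [PySem.Dict.mem_keys_insert]
        rcases (mem_insort _ _ _).mp hp with hp | hp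
        · exact Or.inl hp
        · exact Or.inr (f2 p hp)
      · intro k v hv
        rw [PySem.Dict.get?_insert] at hv
        split_ifs at hv with hk
        · subst hk
          obtain rfl : b + c.1 = v := by injection hv
          exact ⟨by omega, hg2, hreach_nh hg1⟩
        · exact f4 k v hv
      · intro k v hv
        obtain ⟨v1, hv1, hle⟩ := f5 k v hv
        have hk : k ≠ h + c.2 := fun he => by rw [he, hD] at hv1; exact absurd hv1 (by simp)
        rw [PySem.Dict.get?_insert, if_neg hk]
        exact ⟨v1, hv1, hle⟩
      · intro k v hv hnk
        have hknh : k ≠ h + c.2 := fun he => hnk (he ▸ (mem_insort _ _ _).mpr (Or.inl rfl))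
        rw [PySem.Dict.get?_insert, if_neg hknh] at hv
        exact f6 k v hv (fun hm => hnk ((mem_insort _ _ _).mpr (Or.inr hm)))
      · intro p hp
        rcases (mem_insort _ _ _).mp hp with hp | hp
        · subst hp; exact Or.inr hg1
        · exact f7 p hp
      · intro hm
        rcases (mem_insort _ _ _).mp hm with hm | hm
        · omega
        · exact f8 hm
      · rw [PySem.Dict.keys_insert_of_not_contains _ _ hcontains]
        simp only [List.length_append, List.length_singleton, insort_length]
        omega
      · intro _ _
        rw [PySem.Dict.get?_insert, if_pos rfl]
        exact ⟨b + c.1, rfl, le_refl _⟩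
    | some old =>
      have hcontains : pb.2.contains (h + c.2) = true := by
        cases hco : pb.2.contains (h + c.2) with
        | false =>
          have hnone := (PySem.Dict.get?_eq_none_iff_contains pb.2 (h + c.2)).mpr hco
          rw [hD] at hnone
          exact absurd hnone (by simp)
        | true => rfl
      have hkeys_eq : (pb.2.insert (h + c.2) (b + c.1)).keys = pb.2.keys :=
        PySem.Dict.keys_insert_of_contains _ _ hcontains
      -- the key h + c.2 is strictly above h, hence still pending (not frozen)
      have hnh_pb1 : h + c.2 ∈ pb.1 := by
        by_contra hno
        rcases f6 _ _ hD hno with ⟨he, _⟩ | ⟨_, _, _, hlt⟩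
        · omega
        · omega
      simp only [hD]
      split_ifs with ho
      · refine ⟨⟨f1, ?_, by rw [hkeys_eq]; exact f3, ?_, ?_, ?_, f7, f8, ?_⟩, ?_⟩
        · intro p hp
          rw [hkeys_eq]
          exact f2 p hp
        · intro k v hv
          rw [PySem.Dict.get?_insert] at hv
          split_ifs at hv with hk
          · subst hk
            obtain rfl : b + c.1 = v := by injection hv
            exact ⟨by omega, hg2, hreach_nh hg1⟩
          · exact f4 k v hv
        · intro k v hv
          obtain ⟨v1, hv1, hle⟩ := f5 k v hv
          by_cases hk : k = h + c.2
          · subst hk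
            rw [PySem.Dict.get?_insert, if_pos rfl]
            rw [hD] at hv1
            obtain rfl : old = v1 := by injection hv1
            exact ⟨b + c.1, rfl, by omega⟩
          · rw [PySem.Dict.get?_insert, if_neg hk]
            exact ⟨v1, hv1, hle⟩
        · intro k v hv hnk
          have hknh : k ≠ h + c.2 := fun he => hnk (he ▸ hnh_pb1)
          rw [PySem.Dict.get?_insert, if_neg hknh] at hv
          exact f6 k v hv hnk
        · rw [hkeys_eq]
          exact f9
        · intro _ _
          rw [PySem.Dict.get?_insert, if_pos rfl]
          exact ⟨b + c.1, rfl, le_refl _⟩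
      · exact ⟨⟨f1, f2, f3, f4, f5, f6, f7, f8, f9⟩, fun _ _ => ⟨old, hD, by omega⟩⟩
  · refine ⟨⟨f1, f2, f3, f4, f5, f6, f7, f8, f9⟩, ?_⟩
    intro hc2 hhi
    exact absurd ⟨by omega, hhi⟩ hg

lemma spFold_inv {cups : List (Int × Int)} {low high : Int} {h b : Int} {P : List Int}
    {best : PySem.Dict Int Int} (h0 : 0 ≤ h) (hbr : ReachAt cups h b) :
    ∀ (cs : List (Int × Int)), (∀ c ∈ cs, c ∈ cups) →
    ∀ pb, FInvS cups low high h b P best pb →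
    FInvS cups low high h b P best (cs.foldl (spStep high h b) pb) ∧
    (∀ c ∈ cs, 1 ≤ c.2 → h + c.2 ≤ high →
      ∃ v', (cs.foldl (spStep high h b) pb).2.get? (h + c.2) = some v' ∧ b + c.1 ≤ v') := by
  intro cs
  induction cs with
  | nil => intro _ pb hp; exact ⟨hp, by simp⟩
  | cons c cs ih =>
    intro hcs pb hp
    have hc : c ∈ cups := hcs c (by simp)
    obtain ⟨hp', hprog⟩ := spStep_inv (low := low) (P := P) (best := best) hc h0 hbr hp
    obtain ⟨hF, hprogs⟩ := ih (fun d hd => hcs d (by simp [hd])) _ hp'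
    rw [List.foldl_cons]
    refine ⟨hF, ?_⟩
    intro d hd hd2 hdhi
    rcases List.mem_cons.mp hd with hd | hd
    · subst hd
      obtain ⟨v1, hv1, hle1⟩ := hprog hd2 hdhi
      obtain ⟨v2, hv2, hle2⟩ := spFoldL_mono high h b cs _ _ _ hv1
      exact ⟨v2, hv2, by omega⟩
    · exact hprogs d hd hd2 hdhi

-- the whole-loop invariant of B's while-loop
def SInv (cups : List (Int × Int)) (low high : Int) (P : List Int)
    (best : PySem.Dict Int Int) : Prop :=
  P.Pairwise (· < ·) ∧
  (∀ p ∈ P, p ∈ best.keys) ∧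
  best.keys.Nodup ∧
  (∀ k v, best.get? k = some v → 0 ≤ k ∧ k ≤ high ∧ ReachAt cups k v) ∧
  (∀ k v, best.get? k = some v → k ∉ P →
    v < low ∧ Closure cups high best k v ∧ ∀ p ∈ P, k < p) ∧
  (∃ v0, best.get? 0 = some v0 ∧ 0 ≤ v0)

lemma sp_step_SInv {cups : List (Int × Int)} {low high : Int} {h b : Int} {P : List Int}
    {best : PySem.Dict Int Int} (hpre : Pre2 cups)
    (hinv : SInv cups low high (h :: P) best) (hb : best.get? h = some b)
    (hnl : ¬ low ≤ b) :
    SInv cups low high (cups.foldl (spStep high h b) (P, best)).1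
      (cups.foldl (spStep high h b) (P, best)).2 ∧
    (cups.foldl (spStep high h b) (P, best)).2.keys.length + P.length
      = best.keys.length + (cups.foldl (spStep high h b) (P, best)).1.length := by
  obtain ⟨s1, s2, s3, s4, s5, s6⟩ := hinv
  obtain ⟨hh0, hhhi, hbr⟩ := s4 h b hb
  have hsP : ∀ p ∈ P, h < p := fun p hp => (List.pairwise_cons.mp s1).1 p hp
  have hinit : FInvS cups low high h b P best (P, best) := by
    refine ⟨(List.pairwise_cons.mp s1).2, fun p hp => s2 p (by simp [hp]), s3, s4,
      fun k v hv => ⟨v, hv, le_refl _⟩, ?_, fun p hp => Or.inl hp, ?_, rfl⟩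
    · intro k v hv hnk
      by_cases hkh : k = h
      · subst hkh
        rw [hb] at hv
        refine Or.inl ⟨rfl, ?_⟩
        injection hv with he
        omega
      · have hkc : k ∉ h :: P := by simp [hkh, hnk]
        obtain ⟨_, _, hbelow⟩ := s5 k v hv hkc
        exact Or.inr ⟨hv, hnk, hkh, hbelow h (by simp)⟩
    · intro hm
      have := hsP h hm
      omega
  obtain ⟨hF, hprog⟩ := spFold_inv (low := low) (P := P) (best := best) hh0 hbr cups
    (fun c hc => hc) (P, best) hinit
  obtain ⟨f1, f2, f3, f4, f5, f6, f7, f8, f9⟩ := hF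
  refine ⟨⟨f1, f2, f3, f4, ?_, ?_⟩, f9⟩
  · intro k v hv hnk
    rcases f6 k v hv hnk with ⟨rfl, rfl⟩ | ⟨hvold, hknP, hkh, hkhlt⟩
    · refine ⟨by omega, ?_, ?_⟩
      · intro c hc hhi
        exact hprog c hc (hpre c hc) hhi
      · intro p hp
        rcases f7 p hp with hp' | hp'
        · exact hsP p hp'
        · exact hp'
    · have hkc : k ∉ h :: P := by simp [hkh, hknP]
      obtain ⟨hvlow, hclo, hbelow⟩ := s5 k v hvold hkc
      refine ⟨hvlow, ?_, ?_⟩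
      · intro c hc hhi
        obtain ⟨v1, hv1, hle1⟩ := hclo c hc hhi
        obtain ⟨v2, hv2, hle2⟩ := f5 _ _ hv1
        exact ⟨v2, hv2, by omega⟩
      · intro p hp
        rcases f7 p hp with hp' | hp'
        · exact hbelow p (by simp [hp'])
        · omega
  · obtain ⟨v0, hv0, h00⟩ := s6
    obtain ⟨v1, hv1, hle⟩ := f5 _ _ hv0
    exact ⟨v1, hv1, by omega⟩

lemma nodup_length_le_Icc {high : Int} {l : List Int} (hn : l.Nodup)
    (hb : ∀ x ∈ l, 0 ≤ x ∧ x ≤ high) : l.length ≤ (high + 1).toNat := by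
  classical
  have hmem : ∀ x ∈ l, x ∈ Finset.Icc (0 : Int) high := by
    intro x hx
    rw [Finset.mem_Icc]
    exact hb x hx
  have hsubf : l.toFinset ⊆ Finset.Icc (0 : Int) high :=
    fun x hx => hmem x (List.mem_toFinset.mp hx)
  calc l.length = l.toFinset.card := (List.toFinset_card_of_nodup hn).symm
  _ ≤ (Finset.Icc (0 : Int) high).card := Finset.card_le_card hsubf
  _ = (high + 1).toNat := by rw [Int.card_Icc]; congr 1; omega

lemma keys_length_le {cups : List (Int × Int)} {low high : Int} {P : List Int}
    {best : PySem.Dict Int Int} (hinv : SInv cups low high P best) :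
    best.keys.length ≤ (high + 1).toNat := by
  obtain ⟨_, _, s3, s4, _, _⟩ := hinv
  refine nodup_length_le_Icc s3 ?_
  intro x hx
  cases hg : best.get? x with
  | none => exact absurd ((PySem.Dict.get?_eq_none_iff_not_mem_keys _ _).mp hg) (by simp [hx])
  | some v =>
    obtain ⟨h1, h2, _⟩ := s4 x v hg
    exact ⟨h1, h2⟩

lemma sp_complete {cups : List (Int × Int)} {low high : Int} {best : PySem.Dict Int Int}
    (hpre : Pre2 cups)
    (hcl : ∀ k v, best.get? k = some v → v < low ∧ Closure cups high best k v)
    (hz : ∃ v0, best.get? 0 = some v0 ∧ 0 ≤ v0) :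
    ∀ ms, Mems cups ms → sumHi ms ≤ high →
      ∃ v, best.get? (sumHi ms) = some v ∧ sumLo ms ≤ v := by
  intro ms
  induction ms with
  | nil =>
    intro _ _
    obtain ⟨v0, hv0, h00⟩ := hz
    exact ⟨v0, by simpa using hv0, by simpa using h00⟩
  | cons c ms ih =>
    intro hm hhi
    have hmt : Mems cups ms := fun d hd => hm d (by simp [hd])
    have hcc : c ∈ cups := hm c (by simp)
    have hc2 : 1 ≤ c.2 := hpre c hcc
    rw [sumHi_cons] at hhi
    obtain ⟨v, hv, hle⟩ := ih hmt (by omega)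
    obtain ⟨_, hclo⟩ := hcl _ _ hv
    obtain ⟨v', hv', hge⟩ := hclo c hcc (by omega)
    refine ⟨v', ?_, by rw [sumLo_cons]; omega⟩
    rw [sumHi_cons]
    have : sumHi ms + c.2 = c.2 + sumHi ms := by ring
    rw [← this]
    exact hv'

lemma sp_false {cups : List (Int × Int)} {low high : Int} (hpre : Pre2 cups) :
    ∀ (fuel : Nat) (P : List Int) (best : PySem.Dict Int Int),
    SInv cups low high P best →
    (high + 1).toNat + 1 + P.length ≤ fuel + best.keys.length →
    spGo cups low high fuel P best = false →
    ¬ SpecP cups low high := by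
  intro fuel
  induction fuel with
  | zero =>
    intro P best hinv hfuel _
    have := keys_length_le hinv
    omega
  | succ fuel ih =>
    intro P best hinv hfuel hres
    cases P with
    | nil =>
      rintro ⟨ms, hm, hlow, hhigh⟩
      obtain ⟨_, _, _, _, s5, s6⟩ := hinv
      have hcl : ∀ k v, best.get? k = some v → v < low ∧ Closure cups high best k v := by
        intro k v hv
        obtain ⟨h1, h2, _⟩ := s5 k v hv (by simp)
        exact ⟨h1, h2⟩
      obtain ⟨v, hv, hle⟩ := sp_complete hpre hcl s6 ms hm hhigh
      have := (hcl _ _ hv).1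
      omega
    | cons h P' =>
      obtain ⟨vb, hvb⟩ : ∃ vb, best.get? h = some vb := by
        have hmem := hinv.2.1 h (by simp)
        cases hg : best.get? h with
        | none =>
          exact absurd ((PySem.Dict.get?_eq_none_iff_not_mem_keys _ _).mp hg) (by simp [hmem])
        | some v => exact ⟨v, rfl⟩
      rw [spGo] at hres
      simp only [PySem.Dict.getD_eq_get?_getD, hvb, Option.getD_some] at hres
      by_cases hlb : low ≤ vb
      · rw [if_pos hlb] at hres
        simp at hres
      · rw [if_neg hlb] at hres
        obtain ⟨hinv', hacc⟩ := sp_step_SInv hpre hinv hvb hlb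
        refine ih _ _ hinv' ?_ hres
        simp only [List.length_cons] at hfuel
        omega

lemma sp_true {cups : List (Int × Int)} {low high : Int} (hpre : Pre2 cups) :
    ∀ (fuel : Nat) (P : List Int) (best : PySem.Dict Int Int),
    SInv cups low high P best →
    spGo cups low high fuel P best = true →
    SpecP cups low high := by
  intro fuel
  induction fuel with
  | zero => intro P best _ hres; simp [spGo] at hres
  | succ fuel ih =>
    intro P best hinv hres
    cases P with
    | nil => simp [spGo] at hres
    | cons h P' =>
      obtain ⟨vb, hvb⟩ : ∃ vb, best.get? h = some vb := by
        have hmem := hinv.2.1 h (by simp)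
        cases hg : best.get? h with
        | none =>
          exact absurd ((PySem.Dict.get?_eq_none_iff_not_mem_keys _ _).mp hg) (by simp [hmem])
        | some v => exact ⟨v, rfl⟩
      rw [spGo] at hres
      simp only [PySem.Dict.getD_eq_get?_getD, hvb, Option.getD_some] at hres
      by_cases hlb : low ≤ vb
      · obtain ⟨_, hhi, ms, hm, hshi, hslo⟩ := hinv.2.2.2.1 h vb hvb
        exact ⟨ms, hm, by omega, by omega⟩
      · rw [if_neg hlb] at hres
        obtain ⟨hinv', _⟩ := sp_step_SInv hpre hinv hvb hlb
        exact ih _ _ hinv' hres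

lemma B_iff {cups : List (Int × Int)} {low high : Int} (hpre : Pre2 cups) :
    ambiguous_measurements_alt cups low high = true ↔ SpecP cups low high := by
  by_cases hneg : high < 0
  · rw [ambiguous_measurements_alt, if_pos hneg]
    simp only [Bool.false_eq_true, false_iff]
    rintro ⟨ms, hm, _, hhigh⟩
    have := sumHi_nonneg hpre hm
    omega
  · have hh : 0 ≤ high := by omega
    by_cases hl0 : low ≤ 0
    · rw [ambiguous_measurements_alt, if_neg hneg, if_pos hl0]
      simp only [true_iff]
      exact ⟨[], fun c hc => absurd hc (List.not_mem_nil), by simpa using hl0, by simpa using hh⟩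
    rw [ambiguous_measurements_alt, if_neg hneg, if_neg hl0]
    have hget0 : ∀ k, (PySem.Dict.empty.insert (0 : Int) (0 : Int)).get? k
        = if k = 0 then some 0 else none := by
      intro k
      rw [PySem.Dict.get?_insert]
      split_ifs <;> simp [PySem.Dict.get?_empty]
    have hkeys0 : (PySem.Dict.empty.insert (0 : Int) (0 : Int)).keys = [0] := by
      rw [PySem.Dict.keys_insert_of_not_contains _ _ (PySem.Dict.contains_empty 0)]
      rw [PySem.Dict.keys_empty]
      rfl
    have hinv0 : SInv cups low high [0] (PySem.Dict.empty.insert 0 0) := by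
      refine ⟨by simp, ?_, ?_, ?_, ?_, ?_⟩
      · intro p hp
        simp at hp
        simp [hp, hkeys0]
      · rw [hkeys0]; simp
      · intro k v hv
        rw [hget0] at hv
        split_ifs at hv with hk
        · subst hk
          obtain rfl : (0 : Int) = v := by injection hv
          exact ⟨le_refl _, hh,
            ⟨[], fun c hc => absurd hc (List.not_mem_nil), by simp, by simp⟩⟩
      · intro k v hv hnk
        rw [hget0] at hv
        split_ifs at hv with hk
        exact absurd (by simp [hk]) hnk
      · exact ⟨0, by rw [hget0]; simp, le_refl _⟩
    constructor
    · intro hres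
      exact sp_true hpre _ _ _ hinv0 hres
    · intro hspec
      cases hres : spGo cups low high ((high + 1).toNat + 1) [0]
          (PySem.Dict.empty.insert 0 0) with
      | false =>
        exact absurd hspec (sp_false hpre _ _ _ hinv0 (by simp [hkeys0]) hres)
      | true => rfl

lemma bfsFold_prune {high : Int} {s : Int × Int} :
    ∀ (cs : List (Int × Int)) (p : List (Int × Int) × List (Int × Int)),
    (∀ c ∈ cs, high < s.2 + c.2) → cs.foldl (bfsStep high s) p = p := by
  intro cs
  induction cs with
  | nil => intro p _; rfl
  | cons c cs ih =>
    intro p hcs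
    rw [List.foldl_cons]
    have hstep : bfsStep high s p c = p := by
      unfold bfsStep
      rw [if_pos (hcs c (by simp))]
    rw [hstep]
    exact ih p (fun d hd => hcs d (by simp [hd]))

lemma bfsAux_nil (cups : List (Int × Int)) (low high : Int) (v : List (Int × Int)) :
    ∀ fuel, bfsAux cups low high fuel [] v = false := by
  intro fuel
  cases fuel with
  | zero => rfl
  | succ fuel => rfl

-- ===== VERDICT (by name: the statement is the Claim_ definition above) =====
theorem ambiguous_measurements_spec : Claim_equal_ambiguous_measurements := by
  intro cups low high _ hpre
  unfold Spec_ambiguous_measurements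
  rcases hpre with ⟨hl, hh⟩ | hpre2 | ⟨hneg, hpr⟩
  · -- low ≤ 0 ≤ high: both programs answer True at once (the empty combination)
    have hA : ambiguous_measurements cups low high = true := by
      unfold ambiguous_measurements pvFuelA
      rw [bfsAux]
      rw [if_pos ⟨by simpa using hl, by simpa using hh⟩]
    have hB : ambiguous_measurements_alt cups low high = true := by
      unfold ambiguous_measurements_alt
      rw [if_neg (by omega), if_pos hl]
    rw [hA, hB]
  · have h1 := A_iff (low := low) (high := high) hpre2
    have h2 := B_iff (low := low) (high := high) hpre2
    cases hA : ambiguous_measurements cups low high with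
    | false =>
      cases hB : ambiguous_measurements_alt cups low high with
      | false => rfl
      | true => exact absurd (h1.mpr (h2.mp hB)) (by simp [hA])
    | true => exact (h2.mpr (h1.mp hA)).symm
  · -- high < 0 and every cup pruned immediately: both programs answer False
    have hA : ambiguous_measurements cups low high = false := by
      unfold ambiguous_measurements pvFuelA
      rw [bfsAux, if_neg (by omega)]
      have hfold : bfsFold cups high ((0 : Int), (0 : Int)) ([], [((0 : Int), (0 : Int))])
          = ([], [((0 : Int), (0 : Int))]) := by
        unfold bfsFold
        exact bfsFold_prune cups _ (fun c hc => by simpa using hpr c hc)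
      rw [hfold]
      exact bfsAux_nil cups low high _ _
    have hB : ambiguous_measurements_alt cups low high = false := by
      unfold ambiguous_measurements_alt
      rw [if_pos hneg]
    rw [hA, hB]
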